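-- pv_equiv track=rewrite | github.com/Nathan-Koh/ITMGT | KOH_SET4.py | telephone_decipher
-- ===== SOURCE A (Python) =====
-- def telephone_decipher(telephone_string):
--
--     output = ""
--     counter = 0
--     key = ""
--     decipher_dict = {
--         "0":" ",
--         '2': 'A',
--         '22': 'B',
--         '222': 'C',
--         '3': 'D',
--         '33': 'E',
--         '333': 'F',
--         '4': 'G',
--         '44': 'H',
--         '444': 'I',
--         '5': 'J',
--         '55': 'K',
--         '555': 'L',
--         '6': 'M',
--         '66': 'N',
--         '666': 'O',
--         '7': 'P',
--         '77': 'Q',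
--         '777': 'R',
--         '7777': 'S',
--         '8': 'T',
--         '88': 'U',
--         '888': 'V',
--         '9': 'W',
--         '99': 'X',
--         '999': 'Y',
--         '9999': 'Z'
--     }
--
--     while counter < len(telephone_string):
--         if telephone_string[counter] == "_":
--             counter += 1
--             continue
--         else:
--             key += telephone_string[counter] # for first number
--             if counter == (len(telephone_string) -1):
--                 pass
--             else:
--                 while telephone_string[counter] == telephone_string[counter+1]: # for any succeeding similar numbers
--                     key += telephone_string[counter]
--                     counter += 1
--                     if counter == (len(telephone_string) -1):
--                         break
--             output += decipher_dict[key]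
--             counter += 1
--             key = ""
--
--     return output
-- ===== SOURCE B (Python) =====
-- def telephone_decipher(telephone_string):
--     decipher_dict = {
--         "0": " ",
--         '2': 'A', '22': 'B', '222': 'C',
--         '3': 'D', '33': 'E', '333': 'F',
--         '4': 'G', '44': 'H', '444': 'I',
--         '5': 'J', '55': 'K', '555': 'L',
--         '6': 'M', '66': 'N', '666': 'O',
--         '7': 'P', '77': 'Q', '777': 'R', '7777': 'S',
--         '8': 'T', '88': 'U', '888': 'V',
--         '9': 'W', '99': 'X', '999': 'Y', '9999': 'Z',
--     }
--     # one flat pass: run-length encode the string, then map each run to a letter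
--     runs = []
--     prev = None
--     count = 0
--     for ch in telephone_string:
--         if ch == prev:
--             count += 1
--         else:
--             if prev is not None:
--                 runs.append((prev, count))
--             prev, count = ch, 1
--     if prev is not None:
--         runs.append((prev, count))
--     return ''.join(decipher_dict[c * n] for c, n in runs if c != '_')
-- ===== Notes on version B (the rewrite author's own statement) =====
-- stated objective: simpler
-- what changed: A's counter-indexed outer while with a nested look-ahead while and a mutable key accumulator is replaced by a flat run-length-encoding pass (prev/count state) followed by a single map over the runs that skips the underscore separators and looks each run up in the dict.
import Mathlib
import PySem

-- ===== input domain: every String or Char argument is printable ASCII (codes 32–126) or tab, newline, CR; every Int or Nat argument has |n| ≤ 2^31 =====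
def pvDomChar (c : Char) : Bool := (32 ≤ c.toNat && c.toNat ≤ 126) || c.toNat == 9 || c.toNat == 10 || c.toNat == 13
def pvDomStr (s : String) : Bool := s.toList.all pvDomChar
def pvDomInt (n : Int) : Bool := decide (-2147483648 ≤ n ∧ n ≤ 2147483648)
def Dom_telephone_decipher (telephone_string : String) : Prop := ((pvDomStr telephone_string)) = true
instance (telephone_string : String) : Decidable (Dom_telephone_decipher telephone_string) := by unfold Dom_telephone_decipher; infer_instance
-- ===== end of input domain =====

-- B replaces A's index-juggling nested while loops by a flat run-length-encode pass followed by a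
-- map over the runs (objective: simpler). Pre_ excludes exactly the inputs on which Python A raises KeyError.

-- ===== PORT A =====
-- the decipher_dict literal (shared helper; both Pythons contain the identical literal)
def pvDecipherDict : PySem.Dict (List Char) (List Char) :=
  PySem.Dict.ofList [
    (['0'], [' ']),
    (['2'], ['A']), (['2','2'], ['B']), (['2','2','2'], ['C']),
    (['3'], ['D']), (['3','3'], ['E']), (['3','3','3'], ['F']),
    (['4'], ['G']), (['4','4'], ['H']), (['4','4','4'], ['I']),
    (['5'], ['J']), (['5','5'], ['K']), (['5','5','5'], ['L']),
    (['6'], ['M']), (['6','6'], ['N']), (['6','6','6'], ['O']),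
    (['7'], ['P']), (['7','7'], ['Q']), (['7','7','7'], ['R']), (['7','7','7','7'], ['S']),
    (['8'], ['T']), (['8','8'], ['U']), (['8','8','8'], ['V']),
    (['9'], ['W']), (['9','9'], ['X']), (['9','9','9'], ['Y']), (['9','9','9','9'], ['Z'])]

-- inner while loop of A: extend key while the next char equals the current one
def pvARun (l : List Char) (counter : Nat) (key : List Char) : Nat × List Char :=
  if _h : counter + 1 < l.length then
    if l.getD counter ' ' = l.getD (counter + 1) ' ' then
      if counter + 1 = l.length - 1 then (counter + 1, key ++ [l.getD counter ' '])
      else pvARun l (counter + 1) (key ++ [l.getD counter ' '])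
    else (counter, key)
  else (counter, key)
termination_by l.length - counter

theorem pvARun_fst_ge (l : List Char) (counter : Nat) (key : List Char) :
    counter ≤ (pvARun l counter key).1 := by
  fun_induction pvARun l counter key <;> simp_all <;> omega

-- the 'if counter == len-1: pass else: while …' block of A, yielding (counter, key) after the run
def pvASeg (l : List Char) (counter : Nat) : Nat × List Char :=
  if counter = l.length - 1 then (counter, [l.getD counter ' '])
  else pvARun l counter [l.getD counter ' ']

theorem pvASeg_fst_ge (l : List Char) (counter : Nat) : counter ≤ (pvASeg l counter).1 := by
  unfold pvASeg; split
  · omega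
  · exact pvARun_fst_ge l counter _

-- outer while loop of A (decipher_dict[key] is getD … []: Pre_ excludes the KeyError inputs)
def pvALoop (l : List Char) (counter : Nat) (output : List Char) : List Char :=
  if _h : counter < l.length then
    if l.getD counter ' ' = '_' then pvALoop l (counter + 1) output
    else pvALoop l ((pvASeg l counter).1 + 1)
           (output ++ pvDecipherDict.getD (pvASeg l counter).2 [])
  else output
termination_by l.length - counter
decreasing_by
  · omega
  · have := pvASeg_fst_ge l counter; omega

def telephone_decipher (telephone_string : String) : String :=
  String.ofList (pvALoop telephone_string.toList 0 [])

-- ===== PORT B =====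
-- one step of Source B's run-length-encoding loop (state: runs, prev, count)
def pvBStep (st : List (Char × Nat) × Option Char × Nat) (ch : Char) :
    List (Char × Nat) × Option Char × Nat :=
  match st with
  | (runs, prev, count) =>
    if prev = some ch then (runs, prev, count + 1)
    else
      match prev with
      | some p => (runs ++ [(p, count)], some ch, 1)
      | none => (runs, some ch, 1)

-- Source B's trailing 'if prev is not None: runs.append((prev, count))' flush
def pvBFin (st : List (Char × Nat) × Option Char × Nat) : List (Char × Nat) :=
  match st with
  | (runs, some p, count) => runs ++ [(p, count)]
  | (runs, none, _) => runs

-- run-length encoding of the string: Source B's flat pass plus the trailing flush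
def pvBRuns (l : List Char) : List (Char × Nat) :=
  pvBFin (l.foldl pvBStep ([], none, 0))

def telephone_decipher_alt (telephone_string : String) : String :=
  String.ofList
    (((pvBRuns telephone_string.toList).filter (fun r => r.1 ≠ '_')).flatMap
      (fun r => pvDecipherDict.getD (List.replicate r.2 r.1) []))

-- ===== PRECONDITION & SPEC =====
-- longest key available for a digit: '0' only alone; '7'/'9' up to four repeats; other digits up to three
def pvRunLimit (c : Char) : Nat := if c = '0' then 1 else if c = '7' ∨ c = '9' then 4 else 3

-- Pre_ holds exactly on the inputs where Python A returns (no KeyError): every character is an underscore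
-- separator or a keypad digit of the dict, and no run of a digit is longer than the longest key for that digit.
def Pre_telephone_decipher (telephone_string : String) : Prop :=
  ∀ i, i < telephone_string.toList.length →
    (telephone_string.toList.getD i ' ' ∈ ['_','0','2','3','4','5','6','7','8','9']) ∧
    (telephone_string.toList.getD i ' ' ≠ '_' →
      ¬ (i + pvRunLimit (telephone_string.toList.getD i ' ') < telephone_string.toList.length ∧
         ∀ j, j < pvRunLimit (telephone_string.toList.getD i ' ') + 1 →
           telephone_string.toList.getD (i + j) ' ' = telephone_string.toList.getD i ' '))
instance (telephone_string : String) : Decidable (Pre_telephone_decipher telephone_string) := by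
  unfold Pre_telephone_decipher; infer_instance

def pvWitness_telephone_decipher : String := "22_7777_0"

def Spec_telephone_decipher (telephone_string : String) (out : String) : Prop := out = telephone_decipher_alt telephone_string
instance (telephone_string : String) (out : String) : Decidable (Spec_telephone_decipher telephone_string out) := by unfold Spec_telephone_decipher; infer_instance

-- ===== CLAIM (what is proved, stated in full; the proofs are below) =====
def Claim_equal_telephone_decipher : Prop := ∀ (telephone_string : String), Dom_telephone_decipher telephone_string → Pre_telephone_decipher telephone_string → Spec_telephone_decipher telephone_string (telephone_decipher telephone_string)

-- ===== LEMMAS AND PROOFS =====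

-- reference function: consume one run (or one underscore) at a time
def pvG (l : List Char) : List Char :=
  match l with
  | [] => []
  | c :: rest =>
    if c = '_' then pvG rest
    else pvDecipherDict.getD (c :: rest.takeWhile (· = c)) [] ++ pvG (rest.dropWhile (· = c))
termination_by l.length
decreasing_by
  · simp
  · have := List.length_dropWhile_le (· = c) rest; simp; omega

theorem pvG_nil : pvG [] = [] := by simp [pvG]

-- a takeWhile (· = c) block is a replicate of its own length
theorem pvTakeWhile_replicate (l : List Char) (c : Char) :
    l.takeWhile (· = c) = List.replicate (l.takeWhile (· = c)).length c := by
  rw [List.eq_replicate_iff]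
  exact ⟨rfl, fun b hb => by simpa using List.mem_takeWhile_imp hb⟩

theorem pvGetD_lt (l : List Char) (i : Nat) (h : i < l.length) : l.getD i ' ' = l[i] := by
  simp [List.getD_eq_getElem?_getD, List.getElem?_eq_getElem h]

theorem pvARun_eq (l : List Char) (counter : Nat) (key : List Char)
    (h : counter + 1 < l.length) :
    pvARun l counter key =
      (counter + ((l.drop (counter + 1)).takeWhile (· = l.getD counter ' ')).length,
       key ++ List.replicate ((l.drop (counter + 1)).takeWhile (· = l.getD counter ' ')).length
         (l.getD counter ' ')) := by
  fun_induction pvARun l counter key with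
  | case1 counter key h1 heq h2 =>
    -- counter+1 is the last index: the remaining run is exactly one character
    have hd : l.drop (counter + 1) = [l.getD (counter + 1) ' '] := by
      have h3 : counter + 1 < l.length := by omega
      rw [List.drop_eq_getElem_cons h3, pvGetD_lt l _ h3]
      have : l.drop (counter + 2) = [] := by
        apply List.drop_eq_nil_of_le; omega
      rw [this]
    rw [hd, ← heq]
    simp [List.takeWhile]
  | case2 counter key h1 heq h2 ih =>
    have h3 : counter + 2 < l.length := by omega
    have ih' := ih h3
    have hd : l.drop (counter + 1) = l.getD (counter + 1) ' ' :: l.drop (counter + 1 + 1) := by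
      have h4 : counter + 1 < l.length := by omega
      rw [List.drop_eq_getElem_cons h4, pvGetD_lt l _ h4]
    rw [ih', hd, ← heq, List.takeWhile_cons_of_pos (by simp)]
    simp [List.replicate_succ]
    omega
  | case3 counter key h1 heq =>
    have hd : l.drop (counter + 1) = l.getD (counter + 1) ' ' :: l.drop (counter + 2) := by
      rw [List.drop_eq_getElem_cons h1, pvGetD_lt l _ h1]
    rw [hd, List.takeWhile_cons_of_neg (by simp; exact fun hc => heq hc.symm)]
    simp
  | case4 counter key h1 => omega

-- the (counter, key) pair after one run, in closed form
theorem pvASeg_eq (l : List Char) (counter : Nat) (h : counter < l.length) :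
    pvASeg l counter =
      (counter + ((l.drop (counter + 1)).takeWhile (· = l.getD counter ' ')).length,
       List.replicate (((l.drop (counter + 1)).takeWhile (· = l.getD counter ' ')).length + 1)
         (l.getD counter ' ')) := by
  unfold pvASeg
  split
  · rename_i hlast
    have : l.drop (counter + 1) = [] := by apply List.drop_eq_nil_of_le; omega
    simp [this]
  · rename_i hlast
    have h1 : counter + 1 < l.length := by omega
    rw [pvARun_eq l counter _ h1]
    simp [List.replicate_succ]

theorem pvDrop_len_takeWhile (t : List Char) (p : Char → Bool) :
    t.drop (t.takeWhile p).length = t.dropWhile p := by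
  induction t with
  | nil => simp
  | cons x t ih =>
    by_cases hp : p x
    · rw [List.takeWhile_cons_of_pos hp, List.dropWhile_cons_of_pos hp]
      simpa using ih
    · rw [List.takeWhile_cons_of_neg hp, List.dropWhile_cons_of_neg hp]
      simp

theorem pvALoop_eq (l : List Char) (counter : Nat) (output : List Char) :
    pvALoop l counter output = output ++ pvG (l.drop counter) := by
  fun_induction pvALoop l counter output with
  | case1 counter output h hund ih =>
    have hd : l.drop counter = l.getD counter ' ' :: l.drop (counter + 1) := by
      rw [List.drop_eq_getElem_cons h, pvGetD_lt l _ h]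
    rw [ih, hd, pvG, if_pos hund]
  | case2 counter output h hund ih =>
    have hd : l.drop counter = l.getD counter ' ' :: l.drop (counter + 1) := by
      rw [List.drop_eq_getElem_cons h, pvGetD_lt l _ h]
    rw [ih, pvASeg_eq l counter h, hd, pvG, if_neg hund]
    have htw : (l.drop (counter + 1)).takeWhile (· = l.getD counter ' ')
        = List.replicate ((l.drop (counter + 1)).takeWhile (· = l.getD counter ' ')).length
            (l.getD counter ' ') := pvTakeWhile_replicate _ _
    have hdw : l.drop (counter + ((l.drop (counter + 1)).takeWhile (· = l.getD counter ' ')).length + 1)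
        = (l.drop (counter + 1)).dropWhile (· = l.getD counter ' ') := by
      calc l.drop (counter + ((l.drop (counter + 1)).takeWhile (· = l.getD counter ' ')).length + 1)
          = (l.drop (counter + 1)).drop ((l.drop (counter + 1)).takeWhile (· = l.getD counter ' ')).length := by
            rw [List.drop_drop]; congr 1; omega
        _ = _ := pvDrop_len_takeWhile _ _
    rw [hdw, List.replicate_succ, ← htw, List.append_assoc]
  | case3 counter output h =>
    have : l.drop counter = [] := by apply List.drop_eq_nil_of_le; omega
    rw [this, pvG_nil, List.append_nil]

-- run-length encoding, takeWhile/dropWhile form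
def pvRunsTW : List Char → List (Char × Nat)
  | [] => []
  | c :: rest => (c, (rest.takeWhile (· = c)).length + 1) :: pvRunsTW (rest.dropWhile (· = c))
termination_by l => l.length
decreasing_by have := List.length_dropWhile_le (· = c) rest; simp; omega

theorem pvBFoldl_some (l : List Char) (runs : List (Char × Nat)) (c : Char) (n : Nat) :
    pvBFin (l.foldl pvBStep (runs, some c, n)) =
      runs ++ (c, n + (l.takeWhile (· = c)).length) :: pvRunsTW (l.dropWhile (· = c)) := by
  induction l generalizing runs c n with
  | nil => simp [pvBFin, pvRunsTW]
  | cons x rest ih =>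
    by_cases hx : x = c
    · subst hx
      rw [List.foldl_cons]
      have hstep : pvBStep (runs, some x, n) x = (runs, some x, n + 1) := by
        simp [pvBStep]
      rw [hstep, ih]
      simp [List.takeWhile, List.dropWhile]
      omega
    · rw [List.foldl_cons]
      have hstep : pvBStep (runs, some c, n) x = (runs ++ [(c, n)], some x, 1) := by
        simp [pvBStep, Ne.symm hx]
      rw [hstep, ih]
      have htw : (x :: rest).takeWhile (· = c) = [] := by simp [List.takeWhile, hx]
      have hdw : (x :: rest).dropWhile (· = c) = x :: rest := by simp [List.dropWhile, hx]
      rw [htw, hdw, pvRunsTW]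
      simp [Nat.add_comm]

theorem pvBRuns_eq (l : List Char) :
    pvBRuns l = pvRunsTW l := by
  cases l with
  | nil => simp [pvBRuns, pvBFin, pvRunsTW]
  | cons x rest =>
    unfold pvBRuns
    rw [List.foldl_cons]
    have hstep : pvBStep ([], none, 0) x = ([], some x, 1) := by simp [pvBStep]
    rw [hstep, pvBFoldl_some, pvRunsTW]
    simp [Nat.add_comm]

-- pvG skips leading underscores one at a time
theorem pvG_dropWhile_underscore (l : List Char) :
    pvG (l.dropWhile (· = '_')) = pvG l := by
  induction l with
  | nil => simp
  | cons x t ih =>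
    by_cases hx : x = '_'
    · subst hx
      rw [List.dropWhile_cons_of_pos (by simp), ih, pvG, if_pos rfl]
    · rw [List.dropWhile_cons_of_neg (by simp [hx])]

theorem pvB_flat_eq (l : List Char) :
    ((pvRunsTW l).filter (fun r => r.1 ≠ '_')).flatMap
      (fun r => pvDecipherDict.getD (List.replicate r.2 r.1) []) = pvG l := by
  fun_induction pvRunsTW l with
  | case1 => simp [pvG_nil]
  | case2 c rest ih =>
    by_cases hc : c = '_'
    · subst hc
      rw [List.filter_cons_of_neg (by simp), ih, pvG_dropWhile_underscore, pvG, if_pos rfl]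
    · rw [List.filter_cons_of_pos (by simp [hc]), List.flatMap_cons, ih, pvG, if_neg hc]
      congr 1
      conv_rhs => rw [pvTakeWhile_replicate]
      simp [List.replicate_succ]

-- ===== VERDICT (by name: the statement is the Claim_ definition above) =====
theorem telephone_decipher_spec : Claim_equal_telephone_decipher := by
  intro s _ _
  unfold Spec_telephone_decipher telephone_decipher telephone_decipher_alt
  rw [pvALoop_eq, pvBRuns_eq, pvB_flat_eq]
  simp
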